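-- pv_equiv track=rewrite | github.com/naturalstupid/PyJHora | src/jhora/horoscope/dhasa/graha/tithi_yogini.py | _antardhasa
-- ===== SOURCE A (Python) =====
-- dhasa_adhipathi_list = {1:1,0:2,4:3,2:4,3:5,6:6,5:7,7:8} # Total 36 years
--
-- def _next_adhipati(lord,dirn=1):
--     """Returns next lord after `lord` in the adhipati_list"""
--     current = list(dhasa_adhipathi_list.keys()).index(lord)
--     next_lord = list(dhasa_adhipathi_list.keys())[((current + dirn) % len(dhasa_adhipathi_list))]
--     return next_lord
--
-- def _antardhasa(dhasa_lord,antardhasa_option=1):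
--     lord = dhasa_lord
--     if antardhasa_option in [3,4]:
--         lord = _next_adhipati(dhasa_lord, dirn=1)
--     elif antardhasa_option in [5,6]:
--         lord = _next_adhipati(dhasa_lord, dirn=-1)
--     dirn = 1 if antardhasa_option in [1,3,5] else -1
--     _bhukthis = []
--     for _ in range(len(dhasa_adhipathi_list)):
--         _bhukthis.append(lord)
--         lord = _next_adhipati(lord,dirn)
--     return _bhukthis
-- ===== SOURCE B (Python) =====
-- dhasa_adhipathi_list = {1:1,0:2,4:3,2:4,3:5,6:6,5:7,7:8} # Total 36 years
--
-- def _antardhasa(dhasa_lord, antardhasa_option=1):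
--     keys = list(dhasa_adhipathi_list)
--     n = len(keys)
--     i = keys.index(dhasa_lord)
--     if antardhasa_option in (3, 4):
--         i = (i + 1) % n
--     elif antardhasa_option in (5, 6):
--         i = (i - 1) % n
--     if antardhasa_option in (1, 3, 5):
--         return keys[i:] + keys[:i]
--     return [keys[(i - j) % n] for j in range(n)]
-- ===== Notes on version B (the rewrite author's own statement) =====
-- stated objective: simpler
-- what changed: Replaces the 8-iteration append-and-rescan loop (each step re-scanning the key list via .index) by a single .index lookup followed by direct rotation of the precomputed key list (slice concatenation forward, one modular comprehension backward).
import Mathlib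
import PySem

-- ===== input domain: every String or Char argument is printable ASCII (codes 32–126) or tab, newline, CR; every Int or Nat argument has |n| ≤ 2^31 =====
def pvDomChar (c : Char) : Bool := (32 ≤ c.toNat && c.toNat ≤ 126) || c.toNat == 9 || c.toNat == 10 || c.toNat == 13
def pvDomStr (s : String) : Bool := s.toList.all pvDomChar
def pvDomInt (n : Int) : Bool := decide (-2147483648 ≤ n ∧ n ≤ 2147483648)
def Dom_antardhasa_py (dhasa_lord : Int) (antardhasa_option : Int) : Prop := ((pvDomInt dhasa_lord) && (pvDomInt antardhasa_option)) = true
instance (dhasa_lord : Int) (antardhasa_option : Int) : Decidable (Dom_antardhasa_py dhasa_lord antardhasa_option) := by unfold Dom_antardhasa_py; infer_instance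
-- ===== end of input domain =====

-- B builds the 8-lord sequence by one index lookup and list rotation instead of A's repeated
-- append-and-rescan stepping; equivalence of return values is proved on lords present in the table.

-- ===== PORT A =====
-- list(dhasa_adhipathi_list.keys()) in insertion order
def pvKeys : List Int := [1, 0, 4, 2, 3, 6, 5, 7]

-- _next_adhipati: '.index' raises ValueError for a lord not in the table; Pre_ excludes that,
-- so the 'getD 0' defaults are never reached on admitted inputs.
def pvNextAdhipati (lord : Int) (dirn : Int) : Int :=
  let current : Nat := (PySem.List.index? pvKeys lord).getD 0
  (PySem.List.pyGet? pvKeys (PySem.Int.mod ((current : Int) + dirn) 8)).getD 0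

def antardhasa_py (dhasa_lord : Int) (antardhasa_option : Int) : List Int :=
  let lord : Int :=
    if antardhasa_option == 3 || antardhasa_option == 4 then pvNextAdhipati dhasa_lord 1
    else if antardhasa_option == 5 || antardhasa_option == 6 then pvNextAdhipati dhasa_lord (-1)
    else dhasa_lord
  let dirn : Int :=
    if antardhasa_option == 1 || antardhasa_option == 3 || antardhasa_option == 5 then 1 else -1
  let st := (List.range 8).foldl
    (fun (s : List Int × Int) _ => (s.1 ++ [s.2], pvNextAdhipati s.2 dirn)) ([], lord)
  st.1

-- ===== PORT B =====
def antardhasa_py_alt (dhasa_lord : Int) (antardhasa_option : Int) : List Int :=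
  let keys : List Int := [1, 0, 4, 2, 3, 6, 5, 7]
  -- keys.index(dhasa_lord); ValueError (none) excluded by Pre_
  let i0 : Int := ((PySem.List.index? keys dhasa_lord).getD 0 : Nat)
  let i : Int :=
    if antardhasa_option == 3 || antardhasa_option == 4 then PySem.Int.mod (i0 + 1) 8
    else if antardhasa_option == 5 || antardhasa_option == 6 then PySem.Int.mod (i0 - 1) 8
    else i0
  if antardhasa_option == 1 || antardhasa_option == 3 || antardhasa_option == 5 then
    PySem.List.slice keys (some i) none ++ PySem.List.slice keys none (some i)
  else
    (List.range 8).map (fun j => (PySem.List.pyGet? keys (PySem.Int.mod (i - (j : Int)) 8)).getD 0)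

-- ===== PRECONDITION & SPEC =====
-- Pre_ excludes lords absent from the adhipathi table, on which both A and B raise ValueError.
def Pre_antardhasa_py (dhasa_lord : Int) (antardhasa_option : Int) : Prop :=
  dhasa_lord ∈ ([1, 0, 4, 2, 3, 6, 5, 7] : List Int)
instance (dhasa_lord : Int) (antardhasa_option : Int) : Decidable (Pre_antardhasa_py dhasa_lord antardhasa_option) := by unfold Pre_antardhasa_py; infer_instance

def pvWitness_antardhasa_py : Int × Int := (4, 2)

def Spec_antardhasa_py (dhasa_lord : Int) (antardhasa_option : Int) (out : List Int) : Prop := out = antardhasa_py_alt dhasa_lord antardhasa_option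
instance (dhasa_lord : Int) (antardhasa_option : Int) (out : List Int) : Decidable (Spec_antardhasa_py dhasa_lord antardhasa_option out) := by unfold Spec_antardhasa_py; infer_instance

-- ===== CLAIM (what is proved, stated in full; the proofs are below) =====
def Claim_equal_antardhasa_py : Prop := ∀ (dhasa_lord : Int) (antardhasa_option : Int), Dom_antardhasa_py dhasa_lord antardhasa_option → Pre_antardhasa_py dhasa_lord antardhasa_option → Spec_antardhasa_py dhasa_lord antardhasa_option (antardhasa_py dhasa_lord antardhasa_option)

-- ===== LEMMAS AND PROOFS =====

-- ===== VERDICT (by name: the statement is the Claim_ definition above) =====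
theorem antardhasa_py_spec : Claim_equal_antardhasa_py := by
  intro dl o _ pre
  unfold Spec_antardhasa_py
  unfold Pre_antardhasa_py at pre
  simp only [List.mem_cons, List.not_mem_nil, or_false] at pre
  cases h34 : (o == 3 || o == 4) <;>
  cases h56 : (o == 5 || o == 6) <;>
  cases h135 : (o == 1 || o == 3 || o == 5) <;>
  rcases pre with rfl | rfl | rfl | rfl | rfl | rfl | rfl | rfl <;>
    simp only [antardhasa_py, antardhasa_py_alt, h34, h56, h135] <;> decide
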